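-- pv_equiv track=rewrite | github.com/BadRussianSPb/algorithms | Pavlov_Egor_lesson_2/PE-les_2_task_2.py | even_namb
-- ===== SOURCE A (Python) =====
-- def even_namb(n, k, evens=0):
--     if k == 0:
--         return evens
--     else:
--         if (n % 10) % 2 == 0:
--             return even_namb(n // 10, k - 1, evens + 1)
--         else:
--             return even_namb(n // 10, k - 1, evens)
-- ===== SOURCE B (Python) =====
-- def even_namb(n, k, evens=0):
--     result = evens
--     for _ in range(k):
--         d = n % 10
--         n //= 10
--         if d % 2 == 0:
--             result += 1
--     return result
-- ===== Notes on version B (the rewrite author's own statement) =====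
-- stated objective: idiomatic
-- what changed: Replaced the tail recursion (which rebinds n, k and the evens accumulator each call) with an iterative for-loop over range(k) that divides n and increments a local counter.
import Mathlib
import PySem

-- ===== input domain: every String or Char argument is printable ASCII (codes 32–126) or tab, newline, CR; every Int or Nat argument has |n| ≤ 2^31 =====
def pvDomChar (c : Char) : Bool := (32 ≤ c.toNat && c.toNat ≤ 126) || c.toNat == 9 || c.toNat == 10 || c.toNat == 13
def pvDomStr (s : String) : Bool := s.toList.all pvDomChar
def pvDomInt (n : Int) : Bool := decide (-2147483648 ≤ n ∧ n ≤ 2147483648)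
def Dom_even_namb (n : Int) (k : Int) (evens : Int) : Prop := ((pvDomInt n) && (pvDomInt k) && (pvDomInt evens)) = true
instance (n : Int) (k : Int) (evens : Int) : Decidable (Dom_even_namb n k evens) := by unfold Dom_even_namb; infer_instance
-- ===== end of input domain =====

-- B replaces A's tail recursion by an iterative loop over range(k); return values proved equal for k ≥ 0 (A raises RecursionError for k < 0).

-- ===== PORT A =====
-- A recurses once per remaining digit count; the fuel is k (a Nat under Pre_ k ≥ 0).
def even_nambGo (n : Int) (evens : Int) : Nat → Int
  | 0 => evens
  | m + 1 =>
    if (PySem.Int.mod n 10) % 2 == 0 then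
      even_nambGo (PySem.Int.floordiv n 10) (evens + 1) m
    else
      even_nambGo (PySem.Int.floordiv n 10) evens m

def even_namb (n : Int) (k : Int) (evens : Int) : Int :=
  even_nambGo n evens k.toNat

-- ===== PORT B =====
def even_namb_alt (n : Int) (k : Int) (evens : Int) : Int :=
  ((List.range k.toNat).foldl
    (fun (s : Int × Int) _ =>
      let d := PySem.Int.mod s.1 10
      (PySem.Int.floordiv s.1 10, if d % 2 == 0 then s.2 + 1 else s.2))
    (n, evens)).2

-- ===== PRECONDITION & SPEC =====
-- Pre_ excludes k < 0, on which Python A recurses forever and raises RecursionError.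
def Pre_even_namb (n : Int) (k : Int) (evens : Int) : Prop := 0 ≤ k
instance (n : Int) (k : Int) (evens : Int) : Decidable (Pre_even_namb n k evens) := by unfold Pre_even_namb; infer_instance
def pvWitness_even_namb : Int × Int × Int := (123, 2, 0)

def Spec_even_namb (n : Int) (k : Int) (evens : Int) (out : Int) : Prop := out = even_namb_alt n k evens
instance (n : Int) (k : Int) (evens : Int) (out : Int) : Decidable (Spec_even_namb n k evens out) := by unfold Spec_even_namb; infer_instance

-- ===== CLAIM (what is proved, stated in full; the proofs are below) =====
def Claim_equal_even_namb : Prop := ∀ (n : Int) (k : Int) (evens : Int), Dom_even_namb n k evens → Pre_even_namb n k evens → Spec_even_namb n k evens (even_namb n k evens)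

-- ===== LEMMAS AND PROOFS =====
theorem even_namb_fold_eq_go (m : Nat) : ∀ (n evens : Int),
    ((List.range m).foldl
      (fun (s : Int × Int) _ =>
        let d := PySem.Int.mod s.1 10
        (PySem.Int.floordiv s.1 10, if d % 2 == 0 then s.2 + 1 else s.2))
      (n, evens)).2 = even_nambGo n evens m := by
  induction m with
  | zero => intro n evens; simp [even_nambGo]
  | succ m ih =>
    intro n evens
    rw [List.range_succ_eq_map]
    simp only [List.foldl_cons, List.foldl_map, even_nambGo]
    split_ifs with h <;> exact ih _ _

-- ===== VERDICT (by name: the statement is the Claim_ definition above) =====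
theorem even_namb_spec : Claim_equal_even_namb := by
  intro n k evens _ _
  unfold Spec_even_namb even_namb even_namb_alt
  exact (even_namb_fold_eq_go k.toNat n evens).symm
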